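-- pv_equiv track=rewrite | github.com/wryenmeek/knowledgebase | .github/skills/validate-wiki-governance/logic/validate_wiki_governance.py | resolve_validators
-- ===== SOURCE A (Python) =====
-- from enum import StrEnum
-- from typing import Iterable, Sequence
--
-- class ValidatorName(StrEnum):
--     SOURCEREF_SHAPE = "sourceref-shape"
--     PAGE_TEMPLATE = "page-template"
--     APPEND_ONLY_LOG = "append-only-log"
--     TOPOLOGY_HYGIENE = "topology-hygiene"
--     FRESHNESS_THRESHOLD = "freshness-threshold"
--
-- SUPPORTED_VALIDATORS: tuple[ValidatorName, ...] = (
--     ValidatorName.SOURCEREF_SHAPE,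
--     ValidatorName.PAGE_TEMPLATE,
--     ValidatorName.APPEND_ONLY_LOG,
--     ValidatorName.TOPOLOGY_HYGIENE,
-- )
--
-- def resolve_validators(raw_validators: Sequence[str] | None) -> tuple[tuple[ValidatorName, ...], tuple[str, ...]]:
--     if not raw_validators:
--         return SUPPORTED_VALIDATORS, ()
--
--     selected: list[ValidatorName] = []
--     unsupported: list[str] = []
--     seen: set[str] = set()
--     for raw_name in raw_validators:
--         if raw_name in seen:
--             continue
--         seen.add(raw_name)
--         try:
--             selected.append(ValidatorName(raw_name))
--         except ValueError:
--             unsupported.append(raw_name)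
--     return tuple(selected), tuple(unsupported)
-- ===== SOURCE B (Python) =====
-- from enum import StrEnum
-- from typing import Sequence
--
-- class ValidatorName(StrEnum):
--     SOURCEREF_SHAPE = "sourceref-shape"
--     PAGE_TEMPLATE = "page-template"
--     APPEND_ONLY_LOG = "append-only-log"
--     TOPOLOGY_HYGIENE = "topology-hygiene"
--     FRESHNESS_THRESHOLD = "freshness-threshold"
--
-- SUPPORTED_VALIDATORS: tuple[ValidatorName, ...] = (
--     ValidatorName.SOURCEREF_SHAPE,
--     ValidatorName.PAGE_TEMPLATE,
--     ValidatorName.APPEND_ONLY_LOG,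
--     ValidatorName.TOPOLOGY_HYGIENE,
-- )
--
-- def resolve_validators(raw_validators: Sequence[str] | None) -> tuple[tuple[ValidatorName, ...], tuple[str, ...]]:
--     if not raw_validators:
--         return SUPPORTED_VALIDATORS, ()
--     # Worklist: take the head, classify it, and delete every later duplicate of it
--     # from the pending list; no seen-set is ever maintained.
--     selected: list[ValidatorName] = []
--     unsupported: list[str] = []
--     pending = list(raw_validators)
--     while pending:
--         head = pending[0]
--         pending = [name for name in pending[1:] if name != head]
--         member = ValidatorName._value2member_map_.get(head)
--         if member is not None:
--             selected.append(member)
--         else: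
--             unsupported.append(head)
--     return tuple(selected), tuple(unsupported)
-- ===== Notes on version B (the rewrite author's own statement) =====
-- stated objective: alternative
-- what changed: A's single pass with a seen-set accumulator is replaced by a worklist algorithm: repeatedly take the head of the pending list, classify it, and delete all of its later duplicates from the pending list, so no seen-set exists at all.
import Mathlib
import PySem

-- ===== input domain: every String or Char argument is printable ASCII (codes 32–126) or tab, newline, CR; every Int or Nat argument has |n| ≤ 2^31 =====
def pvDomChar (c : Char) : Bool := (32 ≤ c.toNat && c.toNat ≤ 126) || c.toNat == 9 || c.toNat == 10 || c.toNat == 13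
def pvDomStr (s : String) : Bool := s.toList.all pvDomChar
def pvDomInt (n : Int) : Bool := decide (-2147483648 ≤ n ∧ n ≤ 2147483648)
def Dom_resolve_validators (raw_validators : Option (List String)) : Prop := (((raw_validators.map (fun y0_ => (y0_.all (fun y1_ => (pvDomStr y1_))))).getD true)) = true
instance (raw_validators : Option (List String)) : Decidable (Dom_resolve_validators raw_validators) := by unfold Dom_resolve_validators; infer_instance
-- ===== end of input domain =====

-- B replaces A's seen-set single pass by a worklist algorithm that repeatedly takes
-- the head of the pending list and deletes its later duplicates (objective: alternative).
-- ValidatorName is a StrEnum: its members are modelled by their string values.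

-- ===== PORT A =====
-- the five ValidatorName enum values ('ValidatorName(raw)' succeeds iff raw is one of these)
def rvEnumVals : List String :=
  ["sourceref-shape", "page-template", "append-only-log", "topology-hygiene", "freshness-threshold"]

-- SUPPORTED_VALIDATORS
def rvSupported : List String :=
  ["sourceref-shape", "page-template", "append-only-log", "topology-hygiene"]

-- one iteration of A's for-loop over state (selected, unsupported, seen)
def rvLoopA (st : List String × List String × PySem.Set String) (raw : String) :
    List String × List String × PySem.Set String :=
  if PySem.Set.contains st.2.2 raw then st
  else
    let seen := PySem.Set.add st.2.2 raw
    -- try: selected.append(ValidatorName(raw)) / except ValueError: unsupported.append(raw)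
    if rvEnumVals.contains raw then (st.1 ++ [raw], st.2.1, seen)
    else (st.1, st.2.1 ++ [raw], seen)

def resolve_validators (raw_validators : Option (List String)) : List String × List String :=
  match raw_validators with
  | none => (rvSupported, [])
  | some xs =>
    if xs.isEmpty then (rvSupported, [])
    else
      let st := xs.foldl rvLoopA ([], [], PySem.Set.empty)
      (st.1, st.2.1)

-- ===== PORT B =====
-- B's while loop: consume the head, drop its later duplicates from pending, classify it.
def rvGoB (pending sel uns : List String) : List String × List String :=
  match pending with
  | [] => (sel, uns)
  | head :: rest =>
    rvGoB (rest.filter (fun n => !(n == head)))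
      (if rvEnumVals.contains head then sel ++ [head] else sel)
      (if rvEnumVals.contains head then uns else uns ++ [head])
termination_by pending.length
decreasing_by
  simp only [List.length_unattach, List.length_cons, Nat.lt_succ_iff]
  exact le_trans (List.length_filter_le _ _) (by simp)

def resolve_validators_alt (raw_validators : Option (List String)) : List String × List String :=
  match raw_validators with
  | none => (rvSupported, [])
  | some xs =>
    if xs.isEmpty then (rvSupported, [])
    else rvGoB xs [] []

-- ===== PRECONDITION & SPEC =====
def Spec_resolve_validators (raw_validators : Option (List String)) (out : List String × List String) : Prop := out = resolve_validators_alt raw_validators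
instance (raw_validators : Option (List String)) (out : List String × List String) : Decidable (Spec_resolve_validators raw_validators out) := by unfold Spec_resolve_validators; infer_instance

-- ===== CLAIM (what is proved, stated in full; the proofs are below) =====
def Claim_equal_resolve_validators : Prop := ∀ (raw_validators : Option (List String)), Dom_resolve_validators raw_validators → Spec_resolve_validators raw_validators (resolve_validators raw_validators)

-- ===== LEMMAS AND PROOFS =====

-- the first-occurrence dedup B computes implicitly: head, then dedup of the tail purged of the head
def rvD : List String → List String
  | [] => []
  | h :: t => h :: rvD (t.filter (fun n => !(n == h)))
termination_by l => l.length
decreasing_by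
  simp only [List.length_unattach, List.length_cons, Nat.lt_succ_iff]
  exact le_trans (List.length_filter_le _ _) (by simp)

-- invariant of A's loop: from state (u.filter P, u.filter ¬P, u) it ends in the same
-- shape over the dedup-extension of u by xs
theorem rvLoopA_invariant (xs : List String) : ∀ (u : PySem.Set String),
    xs.foldl rvLoopA
      (u.filter (fun n => rvEnumVals.contains n), u.filter (fun n => !rvEnumVals.contains n), u)
    = ((xs.foldl PySem.Set.add u).filter (fun n => rvEnumVals.contains n),
       (xs.foldl PySem.Set.add u).filter (fun n => !rvEnumVals.contains n),
       xs.foldl PySem.Set.add u) := by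
  induction xs with
  | nil => intro u; rfl
  | cons x xs ih =>
    intro u
    simp only [List.foldl_cons]
    by_cases hx : x ∈ u
    · have h1 : rvLoopA (u.filter (fun n => rvEnumVals.contains n),
          u.filter (fun n => !rvEnumVals.contains n), u) x
          = (u.filter (fun n => rvEnumVals.contains n),
             u.filter (fun n => !rvEnumVals.contains n), u) := by
        simp [rvLoopA, PySem.Set.contains, hx]
      have h2 : PySem.Set.add u x = u := by simp [PySem.Set.add, hx]
      rw [h1, h2]; exact ih u
    · have h2 : PySem.Set.add u x = u ++ [x] := by simp [PySem.Set.add, hx]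
      have h1 : rvLoopA (u.filter (fun n => rvEnumVals.contains n),
          u.filter (fun n => !rvEnumVals.contains n), u) x
          = ((u ++ [x]).filter (fun n => rvEnumVals.contains n),
             (u ++ [x]).filter (fun n => !rvEnumVals.contains n), u ++ [x]) := by
        by_cases hv : x ∈ rvEnumVals <;>
          simp [rvLoopA, PySem.Set.contains, hx, hv, List.filter_append]
      rw [h1, h2]; exact ih (u ++ [x])

-- the seen-set A accumulates is exactly B's head-purge dedup (of what is not yet in u)
theorem foldl_add_eq_rvD (xs : List String) : ∀ (u : List String),
    xs.foldl PySem.Set.add u = u ++ rvD (xs.filter (fun x => !(u.contains x))) := by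
  induction xs with
  | nil => intro u; rw [List.filter_nil, rvD]; simp
  | cons h t ih =>
    intro u
    simp only [List.foldl_cons, List.filter_cons]
    by_cases hu : h ∈ u
    · have h2 : PySem.Set.add u h = u := by simp [PySem.Set.add, hu]
      rw [h2, ih u]
      simp [hu]
    · have hc : u.contains h = false := by simpa using hu
      have h2 : PySem.Set.add u h = u ++ [h] := by simp [PySem.Set.add, hu]
      rw [h2, ih (u ++ [h])]
      simp only [hc, Bool.not_false, if_pos, List.append_assoc, List.singleton_append]
      rw [rvD, List.filter_filter]
      congr 2
      congr 1
      apply List.filter_congr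
      intro a _
      by_cases hah : a = h <;> by_cases hau : a ∈ u <;> simp [hah, hau]

-- B's worklist loop computes the filters of rvD, appended to its accumulators
-- (strong induction on the length of the pending list, which shrinks each step)
theorem rvGoB_spec_aux (N : Nat) : ∀ (pending sel uns : List String), pending.length ≤ N →
    rvGoB pending sel uns
    = (sel ++ (rvD pending).filter (fun n => rvEnumVals.contains n),
       uns ++ (rvD pending).filter (fun n => !rvEnumVals.contains n)) := by
  induction N with
  | zero =>
    intro pending sel uns hp
    have : pending = [] := List.length_eq_zero_iff.mp (Nat.le_zero.mp hp)
    subst this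
    rw [rvGoB, rvD]; simp
  | succ N ih =>
    intro pending sel uns hp
    match pending with
    | [] => rw [rvGoB, rvD]; simp
    | head :: rest =>
      have hlen : (rest.filter (fun n => !(n == head))).length ≤ N := by
        have := List.length_filter_le (fun n => !(n == head)) rest
        simp only [List.length_cons, Nat.succ_le_succ_iff] at hp
        omega
      rw [rvGoB, ih _ _ _ hlen, rvD]
      by_cases hv : head ∈ rvEnumVals <;>
        simp [hv]

theorem rvGoB_spec (pending sel uns : List String) :
    rvGoB pending sel uns
    = (sel ++ (rvD pending).filter (fun n => rvEnumVals.contains n),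
       uns ++ (rvD pending).filter (fun n => !rvEnumVals.contains n)) :=
  rvGoB_spec_aux pending.length pending sel uns le_rfl

-- ===== VERDICT (by name: the statement is the Claim_ definition above) =====
theorem resolve_validators_spec : Claim_equal_resolve_validators := by
  intro raw_validators _
  unfold Spec_resolve_validators resolve_validators resolve_validators_alt
  match raw_validators with
  | none => rfl
  | some xs =>
    by_cases h : xs.isEmpty
    · simp [h]
    · simp only [h, Bool.false_eq_true, if_false]
      have hA := rvLoopA_invariant xs []
      simp only [List.filter_nil] at hA
      have hD := foldl_add_eq_rvD xs []
      simp only [List.nil_append, List.contains_nil, Bool.not_false, List.filter_true] at hD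
      rw [show (PySem.Set.empty : PySem.Set String) = ([] : List String) from rfl, hA, hD,
          rvGoB_spec]
      simp
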